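-- pv_equiv track=rewrite | github.com/narkiss-lefler/Hangman | hangman.py | rule_3
-- ===== SOURCE A (Python) =====
-- def rule_1(words, pattern, ):
--     """for the clues, we want to filter all the words that are:
--      The same length of the pattern that the player create to this point."""
--     filter_lst1 = []
--     for i in range(len(words)):
--         if len(words[i]) == len(pattern):
--             filter_lst1.append(words[i])
--         else:
--             continue
--     return filter_lst1
--
-- def rule_2(words, pattern, wrong_guess_lst):
--     """for the clues, we want to filter from filter_lst1 all the words
--     that are: don't contain any letter that appears in the list of
--      incorrect guesses."""
--     filter_lst2 = []
--     filter_lst1 = rule_1(words, pattern)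
--     for i in range(len(filter_lst1)):
--         sum2 = 0
--         for j in range(len(filter_lst1[0])):
--             if filter_lst1[i][j] not in wrong_guess_lst:
--                 sum2 += 1
--                 if sum2 == len(filter_lst1[0]):
--                     filter_lst2.append(filter_lst1[i])
--             else:
--                 break
--     return filter_lst2
--
-- def rule_3(words, pattern, wrong_guess_lst):
--     """for the clues, we want to filter from filter_lst2 all the words
--     that are: contain identical letters in exactly the same positions of the
--      letters visible in the pattern and that these letters are not found
--      elsewhere in the filtered word"""
--     char = len(pattern) - pattern.count("_")
--     filter_lst3 = []
--     filter_lst2 = rule_2(words, pattern, wrong_guess_lst)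
--     for i in range(len(filter_lst2)):
--         sum3 = 0
--         for j in range(len(filter_lst2[0])):
--             if pattern[j] != "_":
--                 if filter_lst2[i][j] == pattern[j]:
--                     sum3 += 1
--             if ((filter_lst2[i][j] != pattern[j]) and (filter_lst2[i][j]
--                 in pattern)):
--                 sum3 -= 1
--         if sum3 == char:
--             filter_lst3.append(filter_lst2[i])
--     return filter_lst3
-- ===== SOURCE B (Python) =====
-- def rule_3(words, pattern, wrong_guess_lst):
--     revealed = {c for c in pattern if c != "_"}
--     wrong = set(wrong_guess_lst)
--     result = []
--     for w in words:
--         if len(w) != len(pattern):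
--             continue
--         if any(c in wrong for c in w):
--             continue
--         ok = True
--         for wc, pc in zip(w, pattern):
--             if pc != "_":
--                 if wc != pc:
--                     ok = False
--                     break
--             elif wc in revealed:
--                 ok = False
--                 break
--         if ok:
--             result.append(w)
--     return result
-- ===== Notes on version B (the rewrite author's own statement) =====
-- stated objective: simpler
-- what changed: Replaces A's three chained index-loop passes with their sum2/sum3 score-counting tricks by a single pass over words using a precomputed revealed-letter set and a direct per-position boolean check (match at revealed positions, revealed letter forbidden at hidden positions).
-- intended difference: When pattern is the empty string and words contains the empty word, A returns [] (its counting loop over zero positions never reaches the append) while B keeps the empty words, which do match the empty pattern, so B's value is the intended one. — e.g. on rule_3([""], "", []): A returns [], B returns [""]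
import Mathlib
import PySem

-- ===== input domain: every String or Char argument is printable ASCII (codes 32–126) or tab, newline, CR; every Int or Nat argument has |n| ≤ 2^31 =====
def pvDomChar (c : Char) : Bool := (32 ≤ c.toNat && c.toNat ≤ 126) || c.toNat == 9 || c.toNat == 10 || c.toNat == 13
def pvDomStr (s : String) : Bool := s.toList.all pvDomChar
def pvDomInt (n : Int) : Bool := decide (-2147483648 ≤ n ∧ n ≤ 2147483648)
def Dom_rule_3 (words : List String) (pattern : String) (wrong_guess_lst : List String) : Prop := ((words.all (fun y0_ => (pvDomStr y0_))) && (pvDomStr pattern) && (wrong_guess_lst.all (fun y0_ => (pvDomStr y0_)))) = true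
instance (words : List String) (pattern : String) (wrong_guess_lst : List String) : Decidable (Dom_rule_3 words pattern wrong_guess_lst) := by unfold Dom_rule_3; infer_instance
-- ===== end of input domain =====

-- B replaces A's three chained counting passes (rule_1/rule_2/rule_3 with the sum2/sum3 score
-- trick) by one pass per word with a revealed-letter set and a direct per-position check (simpler).


-- ===== PORT A =====
def rule1A (words : List String) (pattern : String) : List String :=
  words.foldl (fun acc w => if w.toList.length = pattern.toList.length then acc ++ [w] else acc) []

-- inner loop of rule_2: j runs over the index list, sum2 is the running count; 'break' = return false
def rule2Go (cs : List Char) (wrong : List String) (n : Nat) : List Nat → Nat → Bool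
  | [], _ => false
  | j :: rest, sum2 =>
    if String.ofList [cs.getD j ' '] ∈ wrong then false
    else if sum2 + 1 = n then true
    else rule2Go cs wrong n rest (sum2 + 1)

def rule2A (words : List String) (pattern : String) (wrong_guess_lst : List String) : List String :=
  let f1 := rule1A words pattern
  let n := ((f1.head?.map (fun w => w.toList.length)).getD 0)
  f1.foldl (fun acc w => if rule2Go w.toList wrong_guess_lst n (List.range n) 0 then acc ++ [w] else acc) []

-- inner loop of rule_3: the sum3 accumulator over the index list
def rule3Sum (cs ps : List Char) (l : List Nat) (s : Int) : Int :=
  l.foldl (fun s j =>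
    let wc := cs.getD j ' '
    let pc := ps.getD j ' '
    let s1 : Int := if pc ≠ '_' ∧ wc = pc then s + 1 else s
    if wc ≠ pc ∧ wc ∈ ps then s1 - 1 else s1) s

def rule_3 (words : List String) (pattern : String) (wrong_guess_lst : List String) : List String :=
  let ps := pattern.toList
  let ch : Int := (ps.length : Int) - (ps.count '_' : Int)
  let f2 := rule2A words pattern wrong_guess_lst
  let n := ((f2.head?.map (fun w => w.toList.length)).getD 0)
  f2.foldl (fun acc w => if rule3Sum w.toList ps (List.range n) 0 = ch then acc ++ [w] else acc) []

-- ===== PORT B =====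
-- per-position scan of Source B's zip loop with early break
def altOk (rev : List Char) : List Char → List Char → Bool
  | wc :: ws, pc :: pss =>
    if pc ≠ '_' then
      (if wc ≠ pc then false else altOk rev ws pss)
    else if wc ∈ rev then false
    else altOk rev ws pss
  | _, _ => true

def rule_3_alt (words : List String) (pattern : String) (wrong_guess_lst : List String) : List String :=
  let ps := pattern.toList
  let revealed : PySem.Set Char := PySem.Set.ofList (ps.filter (fun c => c ≠ '_'))
  let wrongS : PySem.Set String := PySem.Set.ofList wrong_guess_lst
  words.foldl (fun acc w =>
    let cs := w.toList
    if cs.length ≠ ps.length then acc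
    else if cs.any (fun c => String.ofList [c] ∈ wrongS) then acc
    else if altOk revealed cs ps then acc ++ [w] else acc) []

-- ===== PRECONDITION & SPEC =====
-- When pattern is "" and words contains "", A returns [] (its counting loop over zero positions
-- never reaches the append) while B keeps the empty words, which match the empty pattern (intended).
def D_rule_3 (words : List String) (pattern : String) (wrong_guess_lst : List String) : Prop :=
  pattern = "" ∧ "" ∈ words
instance (words : List String) (pattern : String) (wrong_guess_lst : List String) : Decidable (D_rule_3 words pattern wrong_guess_lst) := by unfold D_rule_3; infer_instance

def Spec_rule_3 (words : List String) (pattern : String) (wrong_guess_lst : List String) (out : List String) : Prop := ¬ D_rule_3 words pattern wrong_guess_lst → out = rule_3_alt words pattern wrong_guess_lst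
instance (words : List String) (pattern : String) (wrong_guess_lst : List String) (out : List String) : Decidable (Spec_rule_3 words pattern wrong_guess_lst out) := by unfold Spec_rule_3; infer_instance

def pvDiffWitness_rule_3 : List String × String × List String := ([""], "", [])
def pvDiffWitnessOut_rule_3 : (List String) × (List String) := ([], [""])

-- ===== CLAIM (what is proved, stated in full; the proofs are below) =====
def Claim_unchanged_rule_3 : Prop := ∀ (words : List String) (pattern : String) (wrong_guess_lst : List String), Dom_rule_3 words pattern wrong_guess_lst → Spec_rule_3 words pattern wrong_guess_lst (rule_3 words pattern wrong_guess_lst)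
def Claim_changed_rule_3 : Prop := Dom_rule_3 (pvDiffWitness_rule_3.1) (pvDiffWitness_rule_3.2.1) (pvDiffWitness_rule_3.2.2) ∧ D_rule_3 (pvDiffWitness_rule_3.1) (pvDiffWitness_rule_3.2.1) (pvDiffWitness_rule_3.2.2) ∧ rule_3 (pvDiffWitness_rule_3.1) (pvDiffWitness_rule_3.2.1) (pvDiffWitness_rule_3.2.2) = pvDiffWitnessOut_rule_3.1 ∧ rule_3_alt (pvDiffWitness_rule_3.1) (pvDiffWitness_rule_3.2.1) (pvDiffWitness_rule_3.2.2) = pvDiffWitnessOut_rule_3.2 ∧ pvDiffWitnessOut_rule_3.1 ≠ pvDiffWitnessOut_rule_3.2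
def Claim_exact_rule_3 : Prop := ∀ (words : List String) (pattern : String) (wrong_guess_lst : List String), Dom_rule_3 words pattern wrong_guess_lst → D_rule_3 words pattern wrong_guess_lst → rule_3 words pattern wrong_guess_lst ≠ rule_3_alt words pattern wrong_guess_lst


-- ===== LEMMAS AND PROOFS =====

-- generic: an append-if foldl is a filter
theorem foldl_filter {α : Type} (p : α → Prop) [DecidablePred p] (l acc : List α) :
    l.foldl (fun acc x => if p x then acc ++ [x] else acc) acc
      = acc ++ l.filter (fun x => decide (p x)) := by
  induction l generalizing acc with
  | nil => simp
  | cons x xs ih => by_cases h : p x <;> simp [List.foldl_cons, h, ih, List.filter_cons]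

theorem foldl_filter_bool {α : Type} (p : α → Bool) (l acc : List α) :
    l.foldl (fun acc x => if p x then acc ++ [x] else acc) acc = acc ++ l.filter p := by
  induction l generalizing acc with
  | nil => simp
  | cons x xs ih => by_cases h : p x <;> simp [List.foldl_cons, h, ih]

-- indices 0..n-1 mapped through getD recover the list
theorem map_getD (cs : List Char) (n : Nat) (h : cs.length = n) :
    (List.range' 0 n).map (fun j => cs.getD j ' ') = cs := by
  apply List.ext_getElem
  · simp [h]
  · intro i h1 h2
    have hi : i < cs.length := h2
    simp [List.getD_eq_getElem cs ' ' hi, List.getElem?_eq_getElem hi]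

theorem map_getD_pair (cs ps : List Char) (n : Nat) (h1 : cs.length = n) (h2 : ps.length = n) :
    (List.range' 0 n).map (fun j => (cs.getD j ' ', ps.getD j ' ')) = cs.zip ps := by
  apply List.ext_getElem
  · simp [h1, h2]
  · intro i hi1 hi2
    have hc : i < cs.length := by simp [List.length_zip, h1, h2] at hi2; omega
    have hp : i < ps.length := by simp [List.length_zip, h1, h2] at hi2; omega
    simp [List.getElem?_eq_getElem hc, List.getElem?_eq_getElem hp]

-- rule_1 is a length filter
theorem rule1A_eq (words : List String) (pattern : String) :
    rule1A words pattern
      = words.filter (fun w => decide (w.toList.length = pattern.toList.length)) := by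
  unfold rule1A
  rw [foldl_filter]
  simp

-- characterisation of rule_2's inner counting loop
theorem rule2Go_spec (cs : List Char) (wrong : List String) (n : Nat) :
    ∀ k j, j + k = n →
      rule2Go cs wrong n (List.range' j k) j
        = (decide (0 < k)
            && (List.range' j k).all (fun i => !(decide (String.ofList [cs.getD i ' '] ∈ wrong)))) := by
  intro k
  induction k with
  | zero => intro j h; simp [rule2Go]
  | succ m ih =>
    intro j h
    rw [List.range'_succ]
    by_cases hw : String.ofList [cs.getD j ' '] ∈ wrong
    · have hb : decide (String.ofList [cs.getD j ' '] ∈ wrong) = true := decide_eq_true hw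
      simp only [rule2Go, if_pos hw, List.all_cons, hb, Bool.not_true, Bool.false_and,
        Bool.and_false]
    · have hb : decide (String.ofList [cs.getD j ' '] ∈ wrong) = false := decide_eq_false hw
      rcases Nat.eq_zero_or_pos m with hm | hm
      · subst hm
        have hjn : j + 1 = n := by omega
        simp only [rule2Go, if_neg hw, if_pos hjn, List.range'_zero, List.all_cons,
          List.all_nil, hb, Bool.not_false, Bool.and_true, Bool.true_and]
        simp
      · have hj1 : ¬ (j + 1 = n) := by omega
        have hrec := ih (j + 1) (by omega)
        simp only [rule2Go, if_neg hw, if_neg hj1, hrec, List.all_cons, hb,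
          Bool.not_false, Bool.true_and]
        have h1 : decide (0 < m) = true := decide_eq_true hm
        have h2 : decide (0 < m + 1) = true := by simp
        rw [h1, h2, Bool.true_and]

-- rule_2 as a filter
theorem rule2A_eq (words : List String) (pattern : String) (wrong : List String) :
    rule2A words pattern wrong
      = (words.filter (fun w => decide (w.toList.length = pattern.toList.length))).filter
          (fun w => decide (0 < pattern.toList.length)
            && w.toList.all (fun c => !(decide (String.ofList [c] ∈ wrong)))) := by
  unfold rule2A
  rw [rule1A_eq]
  cases hf : words.filter (fun w => decide (w.toList.length = pattern.toList.length)) with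
  | nil => simp
  | cons h t =>
    have hmem : h ∈ words.filter (fun w => decide (w.toList.length = pattern.toList.length)) := by
      rw [hf]; exact List.mem_cons_self
    have hh : h.toList.length = pattern.toList.length := by
      have := (List.mem_filter.mp hmem).2
      simpa using this
    simp only [List.head?_cons, Option.map_some, Option.getD_some]
    refine (foldl_filter_bool (fun (w : String) => rule2Go w.toList wrong h.toList.length
        (List.range h.toList.length) 0) (h :: t) []).trans ?_
    rw [List.nil_append]
    apply List.filter_congr
    intro w hw
    have hwlen : w.toList.length = pattern.toList.length := by
      have := (List.mem_filter.mp (hf ▸ hw)).2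
      simpa using this
    rw [List.range_eq_range']
    rw [rule2Go_spec w.toList wrong h.toList.length h.toList.length 0 (by omega)]
    rw [hh]
    have hall : (List.range' 0 pattern.toList.length).all
        (fun i => !(decide (String.ofList [w.toList.getD i ' '] ∈ wrong)))
        = w.toList.all (fun c => !(decide (String.ofList [c] ∈ wrong))) := by
      conv_rhs => rw [← map_getD w.toList pattern.toList.length hwlen]
      rw [List.all_map]
      rfl
    rw [hall]

theorem decide_eq_bool {P : Prop} [Decidable P] {b : Bool} (h : P ↔ b = true) :
    decide P = b := by
  cases b <;> simp [h]

theorem sum_ones (ps : List Char) :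
    ((ps.map (fun pc => if pc ≠ '_' then (1 : Int) else 0)).sum)
      = (ps.length : Int) - (ps.count '_' : Int) := by
  induction ps with
  | nil => simp
  | cons pc rest ih =>
    rw [List.map_cons, List.sum_cons, ih]
    by_cases hpc : pc = '_'
    · subst hpc
      rw [if_neg (by simp), List.count_cons_self]
      simp only [List.length_cons]
      push_cast
      ring
    · have hcnt : (pc :: rest).count '_' = rest.count '_' := by
        rw [List.count_cons]
        simp [hpc]
      rw [if_pos hpc, hcnt]
      simp only [List.length_cons]
      push_cast
      ring

-- per-index score increments, as functions of the (word char, pattern char) pair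
def dPair (ps : List Char) (pr : Char × Char) : Int :=
  (if pr.2 ≠ '_' ∧ pr.1 = pr.2 then 1 else 0)
    + (if pr.1 ≠ pr.2 ∧ pr.1 ∈ ps then -1 else 0)

def cPair (pr : Char × Char) : Int := if pr.2 ≠ '_' then 1 else 0

theorem rule3Sum_eq (cs ps : List Char) (l : List Nat) (s : Int) :
    rule3Sum cs ps l s
      = s + (l.map (fun j => dPair ps (cs.getD j ' ', ps.getD j ' '))).sum := by
  induction l generalizing s with
  | nil => simp [rule3Sum]
  | cons j rest ih =>
    have hstep : rule3Sum cs ps (j :: rest) s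
        = rule3Sum cs ps rest
            (if cs.getD j ' ' ≠ ps.getD j ' ' ∧ cs.getD j ' ' ∈ ps then
              (if ps.getD j ' ' ≠ '_' ∧ cs.getD j ' ' = ps.getD j ' ' then s + 1 else s) - 1
             else (if ps.getD j ' ' ≠ '_' ∧ cs.getD j ' ' = ps.getD j ' ' then s + 1 else s)) := rfl
    rw [hstep, ih, List.map_cons, List.sum_cons]
    unfold dPair
    split_ifs <;> ring

theorem sum_le_sum_of_le {α : Type} (l : List α) (d c : α → Int)
    (h : ∀ x ∈ l, d x ≤ c x) : (l.map d).sum ≤ (l.map c).sum := by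
  induction l with
  | nil => simp
  | cons x xs ih =>
    simp only [List.map_cons, List.sum_cons]
    have h1 := h x List.mem_cons_self
    have h2 := ih (fun y hy => h y (List.mem_cons_of_mem x hy))
    omega

theorem sum_eq_iff_forall {α : Type} (l : List α) (d c : α → Int)
    (h : ∀ x ∈ l, d x ≤ c x) :
    ((l.map d).sum = (l.map c).sum) ↔ ∀ x ∈ l, d x = c x := by
  induction l with
  | nil => simp
  | cons x xs ih =>
    have hhd := h x List.mem_cons_self
    have htl : ∀ y ∈ xs, d y ≤ c y := fun y hy => h y (List.mem_cons_of_mem x hy)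
    have hsum := sum_le_sum_of_le xs d c htl
    have ihx := ih htl
    simp only [List.map_cons, List.sum_cons, List.forall_mem_cons]
    constructor
    · intro he
      have h1 : d x = c x := by omega
      have h2 : (xs.map d).sum = (xs.map c).sum := by omega
      exact ⟨h1, ihx.mp h2⟩
    · rintro ⟨h1, h2⟩
      rw [h1, ihx.mpr h2]

theorem dPair_le (ps : List Char) (pr : Char × Char) : dPair ps pr ≤ cPair pr := by
  unfold dPair cPair
  split_ifs <;> first | omega | tauto

theorem dPair_eq_iff (ps : List Char) (pr : Char × Char) :
    dPair ps pr = cPair pr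
      ↔ ((pr.2 ≠ '_' → pr.1 = pr.2)
          ∧ (pr.2 = '_' → ¬ pr.1 ∈ PySem.Set.ofList (ps.filter (fun c => c ≠ '_')))) := by
  obtain ⟨wc, pc⟩ := pr
  have hmem : wc ∈ PySem.Set.ofList (ps.filter (fun c => c ≠ '_')) ↔ (wc ∈ ps ∧ wc ≠ '_') := by
    rw [PySem.Set.mem_ofList, List.mem_filter]
    simp
  unfold dPair cPair
  simp only [hmem]
  by_cases hpc : pc = '_' <;> by_cases hwc : wc = pc <;> by_cases hm : wc ∈ ps <;>
    simp_all <;> omega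

theorem altOk_eq_all (rev : List Char) :
    ∀ (ws pss : List Char),
      altOk rev ws pss
        = (ws.zip pss).all
            (fun pr => decide ((pr.2 ≠ '_' → pr.1 = pr.2) ∧ (pr.2 = '_' → ¬ pr.1 ∈ rev))) := by
  intro ws
  induction ws with
  | nil => intro pss; cases pss <;> simp [altOk]
  | cons wc ws ih =>
    intro pss
    cases pss with
    | nil => simp [altOk]
    | cons pc pss =>
      by_cases hpc : pc = '_'
      · by_cases hm : wc ∈ rev <;> simp [altOk, hpc, hm, ih]
      · by_cases hwc : wc = pc <;> simp [altOk, hpc, hwc, ih]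

-- the score test equals B's positional test, for words of pattern length
theorem scoreCheck (ps cs : List Char) (h : cs.length = ps.length) :
    decide (rule3Sum cs ps (List.range ps.length) 0
              = ((ps.length : Int) - (ps.count '_' : Int)))
      = altOk (PySem.Set.ofList (ps.filter (fun c => c ≠ '_'))) cs ps := by
  rw [List.range_eq_range', rule3Sum_eq, zero_add]
  have hmap : (List.range' 0 ps.length).map (fun j => dPair ps (cs.getD j ' ', ps.getD j ' '))
      = (cs.zip ps).map (dPair ps) := by
    rw [← map_getD_pair cs ps ps.length h rfl, List.map_map]
    rfl
  have hch : ((ps.length : Int) - (ps.count '_' : Int)) = ((cs.zip ps).map cPair).sum := by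
    have h1 : (cs.zip ps).map cPair = ps.map (fun pc => if pc ≠ '_' then (1 : Int) else 0) := by
      rw [show (cPair : Char × Char → Int)
            = (fun pc => if pc ≠ '_' then (1 : Int) else 0) ∘ Prod.snd from rfl]
      rw [← List.map_map, List.map_snd_zip (le_of_eq h.symm)]
    rw [h1, sum_ones]
  rw [hmap, hch]
  apply decide_eq_bool
  rw [altOk_eq_all, List.all_eq_true,
      sum_eq_iff_forall (cs.zip ps) (dPair ps) cPair (fun pr _ => dPair_le ps pr)]
  refine forall_congr' (fun pr => imp_congr_right (fun _ => ?_))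
  rw [dPair_eq_iff]
  exact (decide_eq_true_iff).symm

-- rule_3 as a filter over rule_2's output
theorem rule3_eq_filter (words : List String) (pattern : String) (wrong : List String) :
    rule_3 words pattern wrong
      = (rule2A words pattern wrong).filter
          (fun w => altOk (PySem.Set.ofList (pattern.toList.filter (fun c => c ≠ '_')))
                      w.toList pattern.toList) := by
  unfold rule_3
  cases hf : rule2A words pattern wrong with
  | nil => simp
  | cons h t =>
    have hmem : h ∈ rule2A words pattern wrong := by rw [hf]; exact List.mem_cons_self
    have hh : h.toList.length = pattern.toList.length := by
      rw [rule2A_eq] at hmem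
      have := (List.mem_filter.mp (List.mem_of_mem_filter hmem)).2
      simpa using this
    simp only [List.head?_cons, Option.map_some, Option.getD_some]
    refine (foldl_filter (fun (w : String) => rule3Sum w.toList pattern.toList
        (List.range h.toList.length) 0
          = ((pattern.toList.length : Int) - (pattern.toList.count '_' : Int))) (h :: t) []).trans ?_
    rw [List.nil_append]
    apply List.filter_congr
    intro w hw
    have hwlen : w.toList.length = pattern.toList.length := by
      have hw2 : w ∈ rule2A words pattern wrong := hf ▸ hw
      rw [rule2A_eq] at hw2
      have := (List.mem_filter.mp (List.mem_of_mem_filter hw2)).2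
      simpa using this
    rw [hh, scoreCheck pattern.toList w.toList hwlen]

-- B as a filter
theorem alt_eq_filter (words : List String) (pattern : String) (wrong : List String) :
    rule_3_alt words pattern wrong
      = words.filter (fun w =>
          decide (w.toList.length = pattern.toList.length)
          && !(w.toList.any (fun c => decide (String.ofList [c] ∈ PySem.Set.ofList wrong)))
          && altOk (PySem.Set.ofList (pattern.toList.filter (fun c => c ≠ '_')))
               w.toList pattern.toList) := by
  have hstep : (fun (acc : List String) (w : String) =>
        if w.toList.length ≠ pattern.toList.length then acc
        else if w.toList.any (fun c => decide (String.ofList [c] ∈ PySem.Set.ofList wrong)) then acc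
        else if altOk (PySem.Set.ofList (pattern.toList.filter (fun c => c ≠ '_')))
                 w.toList pattern.toList then acc ++ [w] else acc)
      = (fun acc w =>
          if (decide (w.toList.length = pattern.toList.length)
              && !(w.toList.any (fun c => decide (String.ofList [c] ∈ PySem.Set.ofList wrong)))
              && altOk (PySem.Set.ofList (pattern.toList.filter (fun c => c ≠ '_')))
                   w.toList pattern.toList) then acc ++ [w] else acc) := by
    funext acc w
    by_cases h1 : w.toList.length = pattern.toList.length
    · by_cases h2 : (w.toList.any (fun c => decide (String.ofList [c] ∈ PySem.Set.ofList wrong))) = true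
      · rw [if_neg (fun hn => hn h1), if_pos h2,
          if_neg (fun hc => by rw [h2] at hc; simp at hc)]
      · have h2' : (w.toList.any (fun c => decide (String.ofList [c] ∈ PySem.Set.ofList wrong))) = false :=
          Bool.eq_false_iff.mpr h2
        by_cases h3 : altOk (PySem.Set.ofList (pattern.toList.filter (fun c => c ≠ '_')))
            w.toList pattern.toList = true
        · rw [if_neg (fun hn => hn h1), if_neg (by rw [h2']; simp), if_pos h3,
            if_pos (by rw [decide_eq_true h1, h2', h3]; rfl)]
        · have h3' : altOk (PySem.Set.ofList (pattern.toList.filter (fun c => c ≠ '_')))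
              w.toList pattern.toList = false := Bool.eq_false_iff.mpr h3
          rw [if_neg (fun hn => hn h1), if_neg (by rw [h2']; simp), if_neg (by rw [h3']; simp),
            if_neg (fun hc => by rw [h3'] at hc; simp at hc)]
    · rw [if_pos h1, if_neg (fun hc => by rw [decide_eq_false h1] at hc; simp at hc)]
  show List.foldl (fun (acc : List String) (w : String) =>
        if w.toList.length ≠ pattern.toList.length then acc
        else if w.toList.any (fun c => decide (String.ofList [c] ∈ PySem.Set.ofList wrong)) then acc
        else if altOk (PySem.Set.ofList (pattern.toList.filter (fun c => c ≠ '_')))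
                 w.toList pattern.toList then acc ++ [w] else acc) [] words = _
  rw [hstep]
  refine (foldl_filter_bool (fun (w : String) =>
      decide (w.toList.length = pattern.toList.length)
        && !(w.toList.any (fun c => decide (String.ofList [c] ∈ PySem.Set.ofList wrong)))
        && altOk (PySem.Set.ofList (pattern.toList.filter (fun c => c ≠ '_')))
             w.toList pattern.toList) words []).trans ?_
  rw [List.nil_append]

-- the two per-word wrong-guess tests agree
theorem wrong_tests_agree (wrong : List String) (cs : List Char) :
    (!(cs.any (fun c => decide (String.ofList [c] ∈ PySem.Set.ofList wrong))))
      = cs.all (fun c => !(decide (String.ofList [c] ∈ wrong))) := by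
  have hp : (fun c : Char => decide (String.ofList [c] ∈ PySem.Set.ofList wrong))
      = (fun c : Char => decide (String.ofList [c] ∈ wrong)) := by
    funext c
    exact decide_eq_decide.mpr (PySem.Set.mem_ofList _ _)
  rw [hp, List.all_eq_not_any_not]
  simp

theorem toList_eq_nil_iff (w : String) : w.toList = [] ↔ w = "" := by
  constructor
  · intro h; have := congrArg String.ofList h; simpa using this
  · intro h; simp [h]

-- ===== VERDICT (by name: the statement is the Claim_ definition above) =====
theorem rule_3_spec : Claim_unchanged_rule_3 := by
  intro words pattern wrong _hdom
  intro hnD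
  rw [rule3_eq_filter, rule2A_eq, alt_eq_filter]
  by_cases hps : pattern.toList = []
  · -- pattern is empty but "" ∉ words: both sides are []
    have hwempty : ¬ ("" ∈ words) := by
      intro hmem
      exact hnD ⟨(toList_eq_nil_iff pattern).mp hps, hmem⟩
    have hA : words.filter (fun w => decide (w.toList.length = pattern.toList.length)) = [] := by
      rw [List.filter_eq_nil_iff]
      intro w hw
      simp only [hps, List.length_nil, decide_eq_true_eq]
      intro hlen
      exact hwempty ((toList_eq_nil_iff w).mp (List.length_eq_zero_iff.mp hlen) ▸ hw)
    have hB : words.filter (fun w =>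
          decide (w.toList.length = pattern.toList.length)
          && !(w.toList.any (fun c => decide (String.ofList [c] ∈ PySem.Set.ofList wrong)))
          && altOk (PySem.Set.ofList (pattern.toList.filter (fun c => c ≠ '_')))
               w.toList pattern.toList) = [] := by
      rw [List.filter_eq_nil_iff]
      intro w hw
      simp only [hps, List.length_nil, Bool.and_eq_true, decide_eq_true_eq]
      rintro ⟨⟨hlen, -⟩, -⟩
      exact hwempty ((toList_eq_nil_iff w).mp (List.length_eq_zero_iff.mp hlen) ▸ hw)
    rw [hA, hB]
    simp
  · -- pattern nonempty: pointwise equality of the filters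
    have hpos : (0 < pattern.toList.length) := List.length_pos_iff.mpr hps
    rw [List.filter_filter, List.filter_filter]
    apply List.filter_congr
    intro w _hw
    rw [wrong_tests_agree wrong w.toList]
    have e0 : decide (0 < pattern.toList.length) = true := decide_eq_true hpos
    rw [e0]
    set A := altOk (PySem.Set.ofList (pattern.toList.filter (fun c => c ≠ '_')))
        w.toList pattern.toList with hA
    set L := decide (w.toList.length = pattern.toList.length) with hL
    set W := w.toList.all (fun c => !(decide (String.ofList [c] ∈ wrong))) with hW
    cases A <;> cases L <;> cases W <;> simp

theorem rule_3_changed : Claim_changed_rule_3 := by unfold Claim_changed_rule_3; decide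

theorem rule_3_tight : Claim_exact_rule_3 := by
  intro words pattern wrong _hdom hD
  obtain ⟨hpat, hmem⟩ := hD
  subst hpat
  have hA : rule_3 words "" wrong = [] := by
    rw [rule3_eq_filter, rule2A_eq]
    have h2 : (words.filter (fun w => decide (w.toList.length = "".toList.length))).filter
        (fun w => decide (0 < "".toList.length)
          && w.toList.all (fun c => !(decide (String.ofList [c] ∈ wrong)))) = [] := by
      rw [List.filter_eq_nil_iff]
      intro w _
      simp
    rw [h2]
    simp
  have hB : "" ∈ rule_3_alt words "" wrong := by
    rw [alt_eq_filter]
    refine List.mem_filter.mpr ⟨hmem, ?_⟩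
    simp [altOk]
  intro h
  rw [hA] at h
  rw [← h] at hB
  exact List.not_mem_nil hB
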